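-- pv_equiv track=rewrite | github.com/tangboxuan/SEPicker | static/Algo_module_codes.py | dict_merger
-- ===== SOURCE A (Python) =====
-- def dict_merger(dict1,dict2):
--     for region in dict2:
--         if region not in dict1:
--             dict1[region] = dict2[region]
--             continue
--         for country in dict2[region]:
--             if country not in dict1[region]:
--                 dict1[region][country] = dict2[region][country]
--                 continue
--             # Doesn't matter if we overwrite since the data is the same if they exist in both
--             for uni in dict2[region][country]:
--                 dict1[region][country][uni] = dict2[region][country][uni]
--
--     return dict1
-- ===== SOURCE B (Python) =====
-- # B: one generic key-merge helper applied at each of the three levels,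
-- # instead of A's three hand-written nested loops; builds a fresh dict
-- # (A mutates dict1 in place and returns it; equivalence is about the return value).
--
-- def _merge(d1, d2, f):
--     out = {k: (f(v, d2[k]) if k in d2 else v) for k, v in d1.items()}
--     for k, v in d2.items():
--         if k not in d1:
--             out[k] = v
--     return out
--
-- def dict_merger(dict1, dict2):
--     return _merge(dict1, dict2,
--                   lambda c1, c2: _merge(c1, c2,
--                                         lambda u1, u2: _merge(u1, u2, lambda a, b: b)))
-- ===== Notes on version B (the rewrite author's own statement) =====
-- stated objective: simpler
-- what changed: Replaces A's three hand-written nested key-membership loops that update dict1 in place with one generic merge helper (map over d1 combining values present in both, then append d2's fresh keys) applied recursively at the three levels; B builds a fresh dict instead of mutating dict1.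
import Mathlib
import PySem

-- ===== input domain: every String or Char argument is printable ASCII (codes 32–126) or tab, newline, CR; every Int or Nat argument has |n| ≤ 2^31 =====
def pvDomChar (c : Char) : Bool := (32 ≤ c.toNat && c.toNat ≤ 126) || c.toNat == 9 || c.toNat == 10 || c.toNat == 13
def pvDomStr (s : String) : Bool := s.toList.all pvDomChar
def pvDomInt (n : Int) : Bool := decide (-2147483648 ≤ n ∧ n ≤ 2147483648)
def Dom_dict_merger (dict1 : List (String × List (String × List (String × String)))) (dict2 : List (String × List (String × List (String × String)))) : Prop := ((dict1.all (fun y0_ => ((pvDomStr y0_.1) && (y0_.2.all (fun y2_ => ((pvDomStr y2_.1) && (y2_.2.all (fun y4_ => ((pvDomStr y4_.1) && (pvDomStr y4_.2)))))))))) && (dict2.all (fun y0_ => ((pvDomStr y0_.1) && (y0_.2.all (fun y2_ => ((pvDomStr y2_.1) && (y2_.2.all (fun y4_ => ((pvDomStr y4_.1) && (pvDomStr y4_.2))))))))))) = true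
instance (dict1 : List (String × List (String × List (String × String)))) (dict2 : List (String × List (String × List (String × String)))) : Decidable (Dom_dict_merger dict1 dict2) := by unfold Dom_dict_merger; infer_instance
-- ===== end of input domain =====

-- B replaces A's three hand-written nested loops by one generic key-merge helper applied
-- at each level (simpler decomposition, same cost); A mutates dict1 in place and returns it,
-- B builds a fresh dict — the equivalence proved here is about the RETURN value only.

-- assoc-list dict primitives (exact Python dict semantics on nodup-key lists:
-- lookup = first match, overwrite keeps position, new keys append)
def aGet? {V : Type} (d : List (String × V)) (k : String) : Option V :=
  (d.find? (fun p => p.1 == k)).map (·.2)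

def aIns {V : Type} (d : List (String × V)) (k : String) (v : V) : List (String × V) :=
  if d.any (fun p => p.1 == k) then d.map (fun p => if p.1 == k then (k, v) else p)
  else d ++ [(k, v)]

-- ===== PORT A =====
-- literal transliteration: outer loop over dict2's items; `region not in dict1` + lookup
-- is the match on aGet?; `dict1[region] = dict2[region]` on a fresh key appends;
-- the nested loops mutate the region/country sub-dict, written back in place by aIns.
def dict_merger (dict1 : List (String × List (String × List (String × String)))) (dict2 : List (String × List (String × List (String × String)))) : List (String × List (String × List (String × String))) :=
  dict2.foldl (fun acc rp =>
    match aGet? acc rp.1 with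
    | none => acc ++ [rp]
    | some rv1 =>
        aIns acc rp.1 (rp.2.foldl (fun acc1 cp =>
          match aGet? acc1 cp.1 with
          | none => acc1 ++ [cp]
          | some cv1 =>
              aIns acc1 cp.1 (cp.2.foldl (fun acc2 up => aIns acc2 up.1 up.2) cv1)) rv1)) dict1

-- ===== PORT B =====
-- generic helper _merge(d1, d2, f): keys of d1 in order (value combined by f when the key
-- is also in d2), then d2's fresh keys appended in order.
def altMerge {V : Type} (d1 d2 : List (String × V)) (f : V → V → V) : List (String × V) :=
  (d1.map (fun p => match aGet? d2 p.1 with | some v2 => (p.1, f p.2 v2) | none => p))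
  ++ d2.filter (fun q => !(d1.any (fun p => p.1 == q.1)))

def dict_merger_alt (dict1 : List (String × List (String × List (String × String)))) (dict2 : List (String × List (String × List (String × String)))) : List (String × List (String × List (String × String))) :=
  altMerge dict1 dict2 (fun c1 c2 => altMerge c1 c2 (fun u1 u2 => altMerge u1 u2 (fun _ b => b)))

-- ===== PRECONDITION & SPEC =====
-- Pre_ only requires the association lists to be genuine dict encodings: distinct keys at
-- every level. Lists with duplicate keys do not represent any Python dict, so A accepts no
-- such input; nothing A returns on is excluded.
def keysNodup3 (d : List (String × List (String × List (String × String)))) : Prop :=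
  (d.map Prod.fst).Nodup ∧ ∀ p ∈ d, (p.2.map Prod.fst).Nodup ∧ ∀ q ∈ p.2, (q.2.map Prod.fst).Nodup

def Pre_dict_merger (dict1 : List (String × List (String × List (String × String)))) (dict2 : List (String × List (String × List (String × String)))) : Prop :=
  keysNodup3 dict1 ∧ keysNodup3 dict2

instance (dict1 : List (String × List (String × List (String × String)))) (dict2 : List (String × List (String × List (String × String)))) : Decidable (Pre_dict_merger dict1 dict2) := by
  unfold Pre_dict_merger; unfold keysNodup3; infer_instance

def pvWitness_dict_merger : (List (String × List (String × List (String × String)))) × (List (String × List (String × List (String × String)))) :=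
  ([("eu", [("uk", [("ucl", "x")])])], [("eu", [("uk", [("lse", "y")])]), ("as", [])])

def Spec_dict_merger (dict1 : List (String × List (String × List (String × String)))) (dict2 : List (String × List (String × List (String × String)))) (out : List (String × List (String × List (String × String)))) : Prop := out = dict_merger_alt dict1 dict2
instance (dict1 : List (String × List (String × List (String × String)))) (dict2 : List (String × List (String × List (String × String)))) (out : List (String × List (String × List (String × String)))) : Decidable (Spec_dict_merger dict1 dict2 out) := by unfold Spec_dict_merger; infer_instance

-- ===== CLAIM (what is proved, stated in full; the proofs are below) =====
def Claim_equal_dict_merger : Prop := ∀ (dict1 : List (String × List (String × List (String × String)))) (dict2 : List (String × List (String × List (String × String)))), Dom_dict_merger dict1 dict2 → Pre_dict_merger dict1 dict2 → Spec_dict_merger dict1 dict2 (dict_merger dict1 dict2)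

-- ===== LEMMAS AND PROOFS =====

-- proof-side view of one update step of A's loops
def mergeStep {V : Type} (g : V → V → V) (acc : List (String × V)) (p : String × V) : List (String × V) :=
  match aGet? acc p.1 with
  | none => acc ++ [p]
  | some v1 => aIns acc p.1 (g v1 p.2)

theorem aGet?_eq_none_iff {V : Type} (d : List (String × V)) (k : String) :
    aGet? d k = none ↔ ∀ p ∈ d, p.1 ≠ k := by
  simp [aGet?, List.find?_eq_none]

theorem mem_of_aGet?_eq_some {V : Type} {d : List (String × V)} {k : String} {v : V}
    (h : aGet? d k = some v) : (k, v) ∈ d := by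
  simp only [aGet?, Option.map_eq_some_iff] at h
  obtain ⟨p, hp, hv⟩ := h
  have hk := List.find?_some hp
  have hmem := List.mem_of_find?_eq_some hp
  simp only [beq_iff_eq] at hk
  cases p; simp_all

theorem val_eq_of_nodup {V : Type} {d : List (String × V)} (hnd : (d.map Prod.fst).Nodup)
    {k : String} {a b : V} (ha : (k, a) ∈ d) (hb : (k, b) ∈ d) : a = b := by
  induction d with
  | nil => cases ha
  | cons hd tl ih =>
    rw [List.map_cons, List.nodup_cons] at hnd
    cases ha with
    | head =>
      cases hb with
      | head => rfl
      | tail _ hb' => exact absurd (List.mem_map_of_mem (f := Prod.fst) hb') hnd.1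
    | tail _ ha' =>
      cases hb with
      | head => exact absurd (List.mem_map_of_mem (f := Prod.fst) ha') hnd.1
      | tail _ hb' => exact ih hnd.2 ha' hb'

theorem any_eq_any_keys {V : Type} (d : List (String × V)) (k : String) :
    d.any (fun p => p.1 == k) = (d.map Prod.fst).any (fun x => x == k) := by
  rw [List.any_map]; rfl

theorem aIns_eq_map {V : Type} {d : List (String × V)} {k : String} (v : V)
    (hmem : d.any (fun p => p.1 == k) = true) :
    aIns d k v = d.map (fun p => if p.1 = k then (k, v) else p) := by
  simp only [aIns, hmem, if_true]
  apply List.map_congr_left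
  intro p _
  by_cases h : p.1 = k <;> simp [h]

theorem keys_aIns {V : Type} (d : List (String × V)) (k : String) (v : V)
    (hmem : d.any (fun p => p.1 == k) = true) :
    (aIns d k v).map Prod.fst = d.map Prod.fst := by
  rw [aIns_eq_map v hmem, List.map_map]
  apply List.map_congr_left
  intro p _
  by_cases h : p.1 = k <;> simp [h]

theorem mem_aIns {V : Type} {d : List (String × V)} {k : String} {v : V} {p : String × V}
    (hmem : d.any (fun q => q.1 == k) = true)
    (hp : p ∈ aIns d k v) : p = (k, v) ∨ (p ∈ d ∧ p.1 ≠ k) := by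
  rw [aIns_eq_map v hmem, List.mem_map] at hp
  obtain ⟨q, hq, he⟩ := hp
  by_cases h : q.1 = k
  · left; rw [if_pos h] at he; exact he.symm
  · right; rw [if_neg h] at he; subst he; exact ⟨hq, h⟩

-- the central lemma: A's in-place update loop over d2 equals B's map-then-append merge
theorem mergeLoop_eq {V : Type} (gA gB : V → V → V) (d2 d1 : List (String × V))
    (h1 : (d1.map Prod.fst).Nodup) (h2 : (d2.map Prod.fst).Nodup)
    (hg : ∀ p1 ∈ d1, ∀ p2 ∈ d2, p1.1 = p2.1 → gA p1.2 p2.2 = gB p1.2 p2.2) :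
    d2.foldl (mergeStep gA) d1 = altMerge d1 d2 gB := by
  induction d2 generalizing d1 with
  | nil =>
    simp [altMerge, aGet?, List.map_id']
  | cons p2 t ih =>
    simp only [List.map_cons, List.nodup_cons, List.mem_map] at h2
    obtain ⟨hk2, h2t⟩ := h2
    have hk2' : ∀ q ∈ t, q.1 ≠ p2.1 := by
      intro q hq hc
      exact hk2 ⟨q, hq, hc⟩
    have htnone : aGet? t p2.1 = none := (aGet?_eq_none_iff t p2.1).2 hk2'
    simp only [List.foldl_cons]
    cases hfind : aGet? d1 p2.1 with
    | none =>
      have hnotin : ∀ p ∈ d1, p.1 ≠ p2.1 := (aGet?_eq_none_iff d1 p2.1).1 hfind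
      have hred : mergeStep gA d1 p2 = d1 ++ [p2] := by unfold mergeStep; rw [hfind]
      rw [hred]
      have h1' : ((d1 ++ [p2]).map Prod.fst).Nodup := by
        simp only [List.map_append, List.map_cons, List.map_nil]
        refine List.Nodup.append h1 (List.nodup_singleton _) ?_
        intro x hx hy
        simp only [List.mem_map] at hx
        simp only [List.mem_cons, List.not_mem_nil, or_false] at hy
        obtain ⟨p, hp, he⟩ := hx
        exact hnotin p hp (he.trans hy)
      rw [ih (d1 ++ [p2]) h1' h2t (by
        intro q1 hq1 q2 hq2 hkey
        rcases List.mem_append.1 hq1 with hin | hone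
        · exact hg q1 hin q2 (List.mem_cons_of_mem _ hq2) hkey
        · simp only [List.mem_cons, List.not_mem_nil, or_false] at hone
          subst hone
          exact absurd hkey (fun hc => hk2' q2 hq2 hc.symm))]
      unfold altMerge
      have hmap : ∀ p ∈ d1,
          (match aGet? t p.1 with | some v2 => (p.1, gB p.2 v2) | none => p)
            = (match aGet? (p2 :: t) p.1 with | some v2 => (p.1, gB p.2 v2) | none => p) := by
        intro p hp
        have : aGet? (p2 :: t) p.1 = aGet? t p.1 := by
          have : (p2.1 == p.1) = false := by
            simp only [beq_eq_false_iff_ne]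
            exact fun hc => hnotin p hp hc.symm
          simp [aGet?, this]
        rw [this]
      have hp2m : (match aGet? t p2.1 with | some v2 => (p2.1, gB p2.2 v2) | none => p2) = p2 := by
        rw [htnone]
      have hfilt : ∀ q ∈ t,
          (!((d1 ++ [p2]).any (fun p => p.1 == q.1))) = (!(d1.any (fun p => p.1 == q.1))) := by
        intro q hq
        have : (p2.1 == q.1) = false := by
          simp only [beq_eq_false_iff_ne]
          exact fun hc => hk2' q hq hc.symm
        simp [List.any_append, this]
      have hp2notin : (d1.any (fun p => p.1 == p2.1)) = false := by
        simp only [List.any_eq_false]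
        intro p hp
        simpa using hnotin p hp
      rw [List.map_append, List.filter_congr hfilt, List.map_congr_left hmap]
      simp only [List.map_cons, List.map_nil, hp2m, List.filter_cons, hp2notin,
        Bool.not_false, if_true]
      simp
    | some v1 =>
      have hred : mergeStep gA d1 p2 = aIns d1 p2.1 (gA v1 p2.2) := by unfold mergeStep; rw [hfind]
      rw [hred]
      have hmemd1 : (p2.1, v1) ∈ d1 := mem_of_aGet?_eq_some hfind
      have hany : d1.any (fun p => p.1 == p2.1) = true := by
        simp only [List.any_eq_true]
        exact ⟨(p2.1, v1), hmemd1, by simp⟩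
      have hgw : gA v1 p2.2 = gB v1 p2.2 :=
        hg (p2.1, v1) hmemd1 p2 (List.mem_cons_self) rfl
      have hkeys : (aIns d1 p2.1 (gA v1 p2.2)).map Prod.fst = d1.map Prod.fst :=
        keys_aIns d1 p2.1 _ hany
      rw [ih (aIns d1 p2.1 (gA v1 p2.2)) (hkeys ▸ h1) h2t (by
        intro q1 hq1 q2 hq2 hkey
        rcases mem_aIns hany hq1 with he | ⟨hin, _⟩
        · exact absurd hkey (by rw [he]; exact fun hc => hk2' q2 hq2 hc.symm)
        · exact hg q1 hin q2 (List.mem_cons_of_mem _ hq2) hkey)]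
      unfold altMerge
      rw [aIns_eq_map _ hany, List.map_map]
      have hmap : ∀ p ∈ d1,
          ((fun p => match aGet? t p.1 with | some v2 => (p.1, gB p.2 v2) | none => p) ∘
            (fun p => if p.1 = p2.1 then (p2.1, gA v1 p2.2) else p)) p
          = (match aGet? (p2 :: t) p.1 with | some v2 => (p.1, gB p.2 v2) | none => p) := by
        intro p hp
        by_cases hpk : p.1 = p2.1
        · have hp' : (p2.1, p.2) ∈ d1 := by rw [← hpk]; cases p; exact hp
          have hv : p.2 = v1 := val_eq_of_nodup h1 hp' hmemd1
          have hcons : aGet? (p2 :: t) p.1 = some p2.2 := by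
            simp [aGet?, hpk]
          simp only [Function.comp_apply, if_pos hpk, htnone, hcons]
          simp [hpk, hv, hgw]
        · have hcons : aGet? (p2 :: t) p.1 = aGet? t p.1 := by
            have : (p2.1 == p.1) = false := by
              simp only [beq_eq_false_iff_ne]
              exact fun hc => hpk hc.symm
            simp [aGet?, this]
          simp only [Function.comp_apply, if_neg hpk, hcons]
      have hfilt : ∀ q ∈ t,
          (!((d1.map (fun p => if p.1 = p2.1 then (p2.1, gA v1 p2.2) else p)).any (fun p => p.1 == q.1)))
            = (!(d1.any (fun p => p.1 == q.1))) := by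
        intro q hq
        rw [any_eq_any_keys, ← aIns_eq_map _ hany, hkeys, ← any_eq_any_keys]
      rw [List.map_congr_left hmap, List.filter_congr hfilt]
      simp [hany]

theorem aIns_eq_mergeStep {V : Type} (acc : List (String × V)) (p : String × V) :
    aIns acc p.1 p.2 = mergeStep (fun (_ b : V) => b) acc p := by
  unfold mergeStep
  cases haux : aGet? acc p.1 with
  | none =>
    have hnone : acc.any (fun q => q.1 == p.1) = false := by
      simp only [List.any_eq_false]
      intro q hq
      simpa using (aGet?_eq_none_iff acc p.1).1 haux q hq
    simp [aIns, hnone]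
  | some v1 => rfl

-- ===== VERDICT (by name: the statement is the Claim_ definition above) =====
theorem dict_merger_spec : Claim_equal_dict_merger := by
  intro d1 d2 _ hpre
  obtain ⟨⟨h1a, h1b⟩, h2a, h2b⟩ := hpre
  unfold Spec_dict_merger dict_merger dict_merger_alt
  have hfun1 : (fun (acc : List (String × List (String × List (String × String)))) rp =>
      match aGet? acc rp.1 with
      | none => acc ++ [rp]
      | some rv1 =>
          aIns acc rp.1 (rp.2.foldl (fun acc1 cp =>
            match aGet? acc1 cp.1 with
            | none => acc1 ++ [cp]
            | some cv1 =>
                aIns acc1 cp.1 (cp.2.foldl (fun acc2 up => aIns acc2 up.1 up.2) cv1)) rv1))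
      = mergeStep (fun rv1 rv2 => rv2.foldl (fun acc1 cp =>
          match aGet? acc1 cp.1 with
          | none => acc1 ++ [cp]
          | some cv1 =>
              aIns acc1 cp.1 (cp.2.foldl (fun acc2 up => aIns acc2 up.1 up.2) cv1)) rv1) := by
    funext acc rp
    unfold mergeStep
    cases aGet? acc rp.1 <;> rfl
  rw [hfun1]
  refine mergeLoop_eq _ _ d2 d1 h1a h2a ?_
  intro p1 hp1 p2 hp2 _
  have hfun2 : (fun (acc1 : List (String × List (String × String))) cp =>
      match aGet? acc1 cp.1 with
      | none => acc1 ++ [cp]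
      | some cv1 =>
          aIns acc1 cp.1 (cp.2.foldl (fun acc2 up => aIns acc2 up.1 up.2) cv1))
      = mergeStep (fun cv1 cv2 => cv2.foldl (fun acc2 up => aIns acc2 up.1 up.2) cv1) := by
    funext acc1 cp
    unfold mergeStep
    cases aGet? acc1 cp.1 <;> rfl
  show p2.2.foldl _ p1.2 = _
  rw [hfun2]
  refine mergeLoop_eq _ _ p2.2 p1.2 ((h1b p1 hp1).1) ((h2b p2 hp2).1) ?_
  intro q1 hq1 q2 hq2 _
  have hfun3 : (fun (acc2 : List (String × String)) (up : String × String) => aIns acc2 up.1 up.2)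
      = mergeStep (fun (_ b : String) => b) := by
    funext acc2 up
    exact aIns_eq_mergeStep acc2 up
  show q2.2.foldl _ q1.2 = _
  rw [hfun3]
  exact mergeLoop_eq _ _ q2.2 q1.2 ((h1b p1 hp1).2 q1 hq1) ((h2b p2 hp2).2 q2 hq2)
    (fun _ _ _ _ _ => rfl)
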